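-- pv_equiv track=rewrite | github.com/Engagic/engagic | vendors/adapters/legistar_adapter_async.py | _filter_leg_ver_attachments
-- ===== SOURCE A (Python) =====
-- from typing import Dict, Any, List, Optional
--
-- def _filter_leg_ver_attachments(attachments: List[Dict[str, Any]]) -> List[Dict[str, Any]]:
--     """
--     Filter attachments to include at most one 'Leg Ver' attachment.
--     Prefer 'Leg Ver2' over 'Leg Ver1' if both exist.
--
--     Args:
--         attachments: List of attachment dictionaries
--
--     Returns:
--         Filtered list of attachments
--     """
--     leg_ver_attachments = []
--     other_attachments = []
--
--     for att in attachments: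
--         name = att.get('name', '').lower()
--         if 'leg ver' in name:
--             leg_ver_attachments.append(att)
--         else:
--             other_attachments.append(att)
--
--     # Select best Leg Ver attachment
--     selected_leg_ver = None
--     if leg_ver_attachments:
--         # Prefer Leg Ver2, then Leg Ver1, then any Leg Ver
--         for att in leg_ver_attachments:
--             name = att.get('name', '').lower()
--             if 'leg ver2' in name or 'leg ver 2' in name:
--                 selected_leg_ver = att
--                 break
--
--         # If no Ver2, look for Ver1
--         if not selected_leg_ver:
--             for att in leg_ver_attachments:
--                 name = att.get('name', '').lower()
--                 if 'leg ver1' in name or 'leg ver 1' in name: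
--                     selected_leg_ver = att
--                     break
--
--         # If no Ver1 or Ver2, just take the first one
--         if not selected_leg_ver:
--             selected_leg_ver = leg_ver_attachments[0]
--
--     # Combine: at most one Leg Ver + all other attachments
--     filtered = other_attachments
--     if selected_leg_ver:
--         filtered.insert(0, selected_leg_ver)
--
--     return filtered
-- ===== SOURCE B (Python) =====
-- from typing import Dict, Any, List
--
-- def _filter_leg_ver_attachments(attachments: List[Dict[str, Any]]) -> List[Dict[str, Any]]:
--     """Single pass: keep non-'leg ver' attachments in order and retain the
--     best-priority 'leg ver' attachment seen (first wins on ties), then prepend it."""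
--     best = None
--     best_prio = 0
--     other = []
--     for att in attachments:
--         name = att.get('name', '').lower()
--         if 'leg ver' in name:
--             if 'leg ver2' in name or 'leg ver 2' in name:
--                 prio = 3
--             elif 'leg ver1' in name or 'leg ver 1' in name:
--                 prio = 2
--             else:
--                 prio = 1
--             if prio > best_prio:
--                 best = att
--                 best_prio = prio
--         else:
--             other.append(att)
--     return ([best] if best is not None else []) + other
-- ===== Notes on version B (the rewrite author's own statement) =====
-- stated objective: simpler
-- what changed: A splits into two lists and re-scans the leg-ver list up to three times (Ver2 pass, Ver1 pass, first-element fallback); B does one pass keeping a running best candidate by priority (3/2/1, strict > so the first at each priority wins) and prepends it at the end.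
import Mathlib
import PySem

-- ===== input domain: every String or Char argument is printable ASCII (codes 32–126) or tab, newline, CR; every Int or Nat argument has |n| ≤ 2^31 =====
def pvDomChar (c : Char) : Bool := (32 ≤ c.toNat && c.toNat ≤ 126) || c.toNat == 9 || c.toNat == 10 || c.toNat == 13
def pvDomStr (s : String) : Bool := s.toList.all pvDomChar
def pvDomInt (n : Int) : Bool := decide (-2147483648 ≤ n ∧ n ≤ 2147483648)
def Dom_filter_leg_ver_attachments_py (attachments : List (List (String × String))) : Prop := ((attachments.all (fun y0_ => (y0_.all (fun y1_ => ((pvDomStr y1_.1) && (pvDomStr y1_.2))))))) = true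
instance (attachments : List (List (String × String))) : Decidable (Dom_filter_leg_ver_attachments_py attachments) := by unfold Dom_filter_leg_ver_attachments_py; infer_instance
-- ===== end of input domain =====

-- B replaces A's split-then-rescan (separate leg-ver list scanned up to three times)
-- by a single pass keeping a running best-priority candidate; objective: simpler.

-- att.get('name', '').lower()
def pvName (att : List (String × String)) : String :=
  PySem.Str.lower (PySem.Dict.getD (PySem.Dict.mk att) "name" "")

def pvIsLeg (att : List (String × String)) : Bool :=
  PySem.Str.isIn "leg ver" (pvName att)

def pvIsV2 (att : List (String × String)) : Bool :=
  PySem.Str.isIn "leg ver2" (pvName att) || PySem.Str.isIn "leg ver 2" (pvName att)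

def pvIsV1 (att : List (String × String)) : Bool :=
  PySem.Str.isIn "leg ver1" (pvName att) || PySem.Str.isIn "leg ver 1" (pvName att)

-- ===== PORT A =====
-- first loop over leg_ver_attachments with break (Ver2)
def pvFindV2 : List (List (String × String)) → Option (List (String × String))
  | [] => none
  | a :: rest => if pvIsV2 a then some a else pvFindV2 rest

-- second loop with break (Ver1)
def pvFindV1 : List (List (String × String)) → Option (List (String × String))
  | [] => none
  | a :: rest => if pvIsV1 a then some a else pvFindV1 rest

def filter_leg_ver_attachments_py (attachments : List (List (String × String))) : List (List (String × String)) :=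
  -- the splitting loop
  let p := attachments.foldl
    (fun (st : List (List (String × String)) × List (List (String × String))) att =>
      if pvIsLeg att then (st.1 ++ [att], st.2) else (st.1, st.2 ++ [att]))
    ([], [])
  let legs := p.1
  let others := p.2
  -- selection of best Leg Ver
  let selected : Option (List (String × String)) :=
    if legs.isEmpty then none
    else
      match pvFindV2 legs with
      | some a => some a
      | none =>
        match pvFindV1 legs with
        | some a => some a
        | none => PySem.List.pyGet? legs 0   -- leg_ver_attachments[0], legs nonempty here
  -- filtered = others; filtered.insert(0, selected) if any
  match selected with
  | some a => a :: others
  | none => others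

-- ===== PORT B =====
-- loop body of Source B: state = (best, best_prio, other)
def pvStepB (st : Option (List (String × String)) × Nat × List (List (String × String)))
    (att : List (String × String)) :
    Option (List (String × String)) × Nat × List (List (String × String)) :=
  if pvIsLeg att then
    let prio : Nat := if pvIsV2 att then 3 else if pvIsV1 att then 2 else 1
    if st.2.1 < prio then (some att, prio, st.2.2) else st
  else (st.1, st.2.1, st.2.2 ++ [att])

def filter_leg_ver_attachments_py_alt (attachments : List (List (String × String))) : List (List (String × String)) :=
  let st := attachments.foldl pvStepB (none, 0, [])
  (match st.1 with
   | some a => [a]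
   | none => []) ++ st.2.2

-- ===== PRECONDITION & SPEC =====
def Spec_filter_leg_ver_attachments_py (attachments : List (List (String × String))) (out : List (List (String × String))) : Prop := out = filter_leg_ver_attachments_py_alt attachments
instance (attachments : List (List (String × String))) (out : List (List (String × String))) : Decidable (Spec_filter_leg_ver_attachments_py attachments out) := by unfold Spec_filter_leg_ver_attachments_py; infer_instance

-- ===== CLAIM (what is proved, stated in full; the proofs are below) =====
def Claim_equal_filter_leg_ver_attachments_py : Prop := ∀ (attachments : List (List (String × String))), Dom_filter_leg_ver_attachments_py attachments → Spec_filter_leg_ver_attachments_py attachments (filter_leg_ver_attachments_py attachments)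

-- ===== LEMMAS AND PROOFS =====

-- explicit recursions mirroring the best/best_prio components of B's fold
def pvSel : List (List (String × String)) → Option (List (String × String)) → Nat → Option (List (String × String))
  | [], b, _ => b
  | a :: l, b, p =>
    if pvIsLeg a then
      let prio : Nat := if pvIsV2 a then 3 else if pvIsV1 a then 2 else 1
      if p < prio then pvSel l (some a) prio else pvSel l b p
    else pvSel l b p

def pvSelP : List (List (String × String)) → Nat → Nat
  | [], p => p
  | a :: l, p =>
    if pvIsLeg a then
      let prio : Nat := if pvIsV2 a then 3 else if pvIsV1 a then 2 else 1
      if p < prio then pvSelP l prio else pvSelP l p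
    else pvSelP l p

theorem pv_foldB (atts : List (List (String × String)))
    (b : Option (List (String × String))) (p : Nat) (oth : List (List (String × String))) :
    atts.foldl pvStepB (b, p, oth) =
      (pvSel atts b p, pvSelP atts p, oth ++ atts.filter (fun a => !pvIsLeg a)) := by
  induction atts generalizing b p oth with
  | nil => simp [pvSel, pvSelP]
  | cons a l ih =>
    simp only [List.foldl_cons, pvStepB, pvSel, pvSelP, List.filter_cons]
    by_cases hL : pvIsLeg a
    · simp only [hL, Bool.not_true, Bool.false_eq_true, if_false, if_true]
      split_ifs <;> simp [ih]
    · simp [hL, ih]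

theorem pv_foldA (atts : List (List (String × String)))
    (l o : List (List (String × String))) :
    atts.foldl
      (fun (st : List (List (String × String)) × List (List (String × String))) att =>
        if pvIsLeg att then (st.1 ++ [att], st.2) else (st.1, st.2 ++ [att]))
      (l, o) =
      (l ++ atts.filter (fun a => pvIsLeg a), o ++ atts.filter (fun a => !pvIsLeg a)) := by
  induction atts generalizing l o with
  | nil => simp
  | cons a t ih =>
    by_cases hL : pvIsLeg a <;> simp [hL, ih]

theorem pvSel_filter (atts : List (List (String × String)))
    (b : Option (List (String × String))) (p : Nat) :
    pvSel atts b p = pvSel (atts.filter (fun a => pvIsLeg a)) b p := by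
  induction atts generalizing b p with
  | nil => rfl
  | cons a l ih =>
    by_cases hL : pvIsLeg a
    · rw [List.filter_cons_of_pos (by simp [hL])]
      simp only [pvSel, hL, if_true]
      split_ifs <;> exact ih _ _
    · rw [List.filter_cons_of_neg (by simp [hL])]
      simp only [pvSel, hL]
      simp only [Bool.false_eq_true, if_false]
      exact ih b p

theorem pvSel_three (ℓ : List (List (String × String))) (b : Option (List (String × String))) :
    pvSel ℓ b 3 = b := by
  induction ℓ generalizing b with
  | nil => rfl
  | cons a l ih =>
    simp only [pvSel]
    split_ifs <;> first | exact ih b | omega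

theorem pvSel_two (ℓ : List (List (String × String))) (b : Option (List (String × String)))
    (h : ∀ a ∈ ℓ, pvIsLeg a = true) :
    pvSel ℓ b 2 = (pvFindV2 ℓ).or b := by
  induction ℓ generalizing b with
  | nil => rfl
  | cons a l ih =>
    have hL : pvIsLeg a = true := h a (List.mem_cons_self ..)
    have h' : ∀ x ∈ l, pvIsLeg x = true := fun x hx => h x (List.mem_cons_of_mem _ hx)
    simp only [pvSel, pvFindV2, hL, if_true]
    by_cases h2 : pvIsV2 a
    · simp [h2, pvSel_three]
    · by_cases h1 : pvIsV1 a <;> simp [h2, h1, ih _ h']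

theorem pvSel_one (ℓ : List (List (String × String))) (b : Option (List (String × String)))
    (h : ∀ a ∈ ℓ, pvIsLeg a = true) :
    pvSel ℓ b 1 = ((pvFindV2 ℓ).or (pvFindV1 ℓ)).or b := by
  induction ℓ generalizing b with
  | nil => rfl
  | cons a l ih =>
    have hL : pvIsLeg a = true := h a (List.mem_cons_self ..)
    have h' : ∀ x ∈ l, pvIsLeg x = true := fun x hx => h x (List.mem_cons_of_mem _ hx)
    simp only [pvSel, pvFindV2, pvFindV1, hL, if_true]
    by_cases h2 : pvIsV2 a
    · simp [h2, pvSel_three]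
    · by_cases h1 : pvIsV1 a
      · have h2' := pvSel_two l (some a) h'
        simp [h2, h1, h2']
      · simp [h2, h1, ih _ h']

theorem pvSel_zero (ℓ : List (List (String × String)))
    (h : ∀ a ∈ ℓ, pvIsLeg a = true) :
    pvSel ℓ none 0 = ((pvFindV2 ℓ).or (pvFindV1 ℓ)).or ℓ.head? := by
  induction ℓ with
  | nil => rfl
  | cons a l ih =>
    have hL : pvIsLeg a = true := h a (List.mem_cons_self ..)
    have h' : ∀ x ∈ l, pvIsLeg x = true := fun x hx => h x (List.mem_cons_of_mem _ hx)
    simp only [pvSel, pvFindV2, pvFindV1, hL, if_true, List.head?_cons]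
    by_cases h2 : pvIsV2 a
    · simp [h2, pvSel_three]
    · by_cases h1 : pvIsV1 a
      · have h2' := pvSel_two l (some a) h'
        simp [h2, h1, h2']
      · have h1' := pvSel_one l (some a) h'
        simp [h2, h1, h1']

theorem pv_pyGet_zero_head? (xs : List (List (String × String))) :
    PySem.List.pyGet? xs 0 = xs.head? := by
  cases xs <;> simp [PySem.List.pyGet?, PySem.List.pyIdx?]

-- ===== VERDICT (by name: the statement is the Claim_ definition above) =====
theorem filter_leg_ver_attachments_py_spec : Claim_equal_filter_leg_ver_attachments_py := by
  intro atts _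
  unfold Spec_filter_leg_ver_attachments_py
  unfold filter_leg_ver_attachments_py filter_leg_ver_attachments_py_alt
  rw [pv_foldA, pv_foldB]
  simp only [List.nil_append]
  set legs := atts.filter (fun a => pvIsLeg a) with hlegs
  have hall : ∀ a ∈ legs, pvIsLeg a = true := by
    intro a ha; exact (List.mem_filter.mp ha).2
  rw [pvSel_filter, ← hlegs, pvSel_zero legs hall, pv_pyGet_zero_head?]
  by_cases hE : legs.isEmpty
  · have : legs = [] := List.isEmpty_iff.mp hE
    simp [this, pvFindV2, pvFindV1]
  · simp only [hE, if_false, Bool.false_eq_true]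
    cases pvFindV2 legs <;> cases pvFindV1 legs <;> cases hh : legs.head? <;>
      simp_all [Option.or]
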